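-- pv_equiv track=rewrite | github.com/LaraHueli/Proyecto-Katas-de-Python | Katas/Katas_completas.py | contar_frecuencias
-- ===== SOURCE A (Python) =====
-- def contar_frecuencias (cadena_texto):
--    cadena = cadena_texto.replace (" ", "")  # .replace elimina espacios. sustituimos " " por "" (" ","")
--    frecuencias = {} # creamos diccionario vacio
--    for letra in cadena: # empezamos bucle para contar
--        if letra in frecuencias:
--            frecuencias[letra] += 1 # Si la letra ya está en el diccionario incrementamos su valor con += 1
--        else:
--            frecuencias[letra] = 1  # Si no está, lo agregamos al diccionario con un valor inicial de 1
--    return frecuencias # devuelve el diccionario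
-- ===== SOURCE B (Python) =====
-- def contar_frecuencias(cadena_texto):
--     # Two-pass decomposition: dedupe the characters first (keeping first-occurrence
--     # order, like the dict A builds), then count each distinct character once.
--     chars = list(cadena_texto.replace(" ", ""))
--     return {letra: chars.count(letra) for letra in dict.fromkeys(chars)}
-- ===== Notes on version B (the rewrite author's own statement) =====
-- stated objective: alternative
-- what changed: Replaces the incremental dict-update loop by a two-pass decomposition: build the list of distinct characters (first occurrences, dict.fromkeys) and then count each distinct character once with list.count, assembling the dict in one comprehension.
import Mathlib
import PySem

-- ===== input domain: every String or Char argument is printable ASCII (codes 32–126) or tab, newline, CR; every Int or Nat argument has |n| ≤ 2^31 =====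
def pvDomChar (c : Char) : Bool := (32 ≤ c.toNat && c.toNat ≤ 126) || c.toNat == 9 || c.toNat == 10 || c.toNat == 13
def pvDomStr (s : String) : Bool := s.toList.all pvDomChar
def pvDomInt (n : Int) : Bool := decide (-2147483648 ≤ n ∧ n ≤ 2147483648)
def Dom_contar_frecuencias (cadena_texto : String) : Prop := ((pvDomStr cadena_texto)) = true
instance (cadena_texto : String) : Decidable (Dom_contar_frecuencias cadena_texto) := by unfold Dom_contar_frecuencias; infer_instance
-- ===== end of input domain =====

-- B replaces A's incremental dict-update loop by a two-pass decomposition (dedupe, then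
-- count each distinct character once); alternative structure of similar cost, not faster.

-- ===== PORT A =====
def contar_frecuencias (cadena_texto : String) : List (String × Int) :=
  let cadena := PySem.Str.replace cadena_texto " " ""
  let frecuencias : PySem.Dict String Int :=
    cadena.toList.foldl (fun d c =>
      let letra := String.singleton c
      if d.contains letra then
        d.insert letra (d.getD letra 0 + 1)
      else
        d.insert letra 1) PySem.Dict.empty
  frecuencias.items

-- ===== PORT B =====
def contar_frecuencias_alt (cadena_texto : String) : List (String × Int) :=
  let chars := (PySem.Str.replace cadena_texto " " "").toList
  (PySem.List.dedup chars).map (fun letra =>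
    (String.singleton letra, (PySem.List.count chars letra : Int)))

-- ===== PRECONDITION & SPEC =====
def Spec_contar_frecuencias (cadena_texto : String) (out : List (String × Int)) : Prop := out = contar_frecuencias_alt cadena_texto
instance (cadena_texto : String) (out : List (String × Int)) : Decidable (Spec_contar_frecuencias cadena_texto out) := by unfold Spec_contar_frecuencias; infer_instance

-- ===== CLAIM (what is proved, stated in full; the proofs are below) =====
def Claim_equal_contar_frecuencias : Prop := ∀ (cadena_texto : String), Dom_contar_frecuencias cadena_texto → Spec_contar_frecuencias cadena_texto (contar_frecuencias cadena_texto)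

-- ===== LEMMAS AND PROOFS =====

-- A's loop body, after keying by the singleton string, is exactly the counter update.
theorem pv_body_eq (d : PySem.Dict String Int) (k : String) :
    (if d.contains k then d.insert k (d.getD k 0 + 1) else d.insert k 1)
      = d.insert k (d.getD k 0 + 1) := by
  by_cases h : d.contains k = true
  · simp [h]
  · simp only [Bool.not_eq_true] at h
    simp [h, PySem.Dict.getD_of_not_contains d 0 h]

-- set(map f xs) = map f (set(xs)) for injective f (first-occurrence order preserved).
theorem pv_ofList_map {α β : Type} [DecidableEq α] [DecidableEq β]
    (f : α → β) (hf : Function.Injective f) (xs : List α) :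
    PySem.Set.ofList (xs.map f) = (PySem.Set.ofList xs).map f := by
  induction xs using List.reverseRecOn with
  | nil => rfl
  | append_singleton xs x ih =>
    rw [List.map_append, List.map_singleton,
        PySem.Set.ofList_append_singleton, PySem.Set.ofList_append_singleton, ih]
    by_cases hx : x ∈ PySem.Set.ofList xs
    · have hx' : x ∈ xs := (PySem.Set.mem_ofList xs x).mp hx
      have h2 : ∃ a ∈ xs, f a = f x := ⟨x, hx', rfl⟩
      simp [PySem.Set.add, hx, h2]
    · have hx' : x ∉ xs := fun h => hx ((PySem.Set.mem_ofList xs x).mpr h)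
      have h2 : ¬ ∃ a ∈ xs, f a = f x := by
        rintro ⟨y, hy, hfy⟩; exact hx' (hf hfy ▸ hy)
      simp [PySem.Set.add, hx, h2]

theorem pv_singleton_inj : Function.Injective String.singleton := by
  intro a b h
  simpa using congrArg String.toList h

-- ===== VERDICT (by name: the statement is the Claim_ definition above) =====
theorem contar_frecuencias_spec : Claim_equal_contar_frecuencias := by
  intro cadena_texto _
  unfold Spec_contar_frecuencias
  simp only [contar_frecuencias, contar_frecuencias_alt]
  generalize (PySem.Str.replace cadena_texto " " "").toList = chars
  have hfold :
      chars.foldl (fun d c =>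
          let letra := String.singleton c
          if d.contains letra then d.insert letra (d.getD letra 0 + 1)
          else d.insert letra 1) PySem.Dict.empty
        = PySem.Dict.counter (chars.map String.singleton) := by
    rw [← PySem.Dict.foldl_insert_getD_add_one_eq_counter, List.foldl_map]
    simp only [pv_body_eq]
  rw [hfold, PySem.Dict.items_counter, PySem.List.dedup_eq_ofList,
      pv_ofList_map String.singleton pv_singleton_inj, List.map_map]
  refine List.map_congr_left (fun c _ => ?_)
  simp [PySem.List.count_eq, List.count_map_of_injective _ _ pv_singleton_inj]
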